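-- pv_equiv track=rewrite | github.com/asi-uniovi/power-simulation | activity_distribution.py | __transpose_histogram
-- ===== SOURCE A (Python) =====
-- def __transpose_histogram(histogram):
--     """Converts the {PC: {Day: {Hour: x}}} hist to {Day: {Hour: [x*]}}."""
--     transposed = {}
--     if histogram is not None:
--         for day in range(7):
--             for hour in range(24):
--                 for value in histogram.values():
--                     if value.get(day, {}).get(hour) is not None:
--                         transposed.setdefault(day, {}).setdefault(
--                             hour, []).append(value.get(day, {}).get(hour))
--     return transposed
-- ===== SOURCE B (Python) =====
-- def __transpose_histogram(histogram):
--     """Converts the {PC: {Day: {Hour: x}}} hist to {Day: {Hour: [x*]}}.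
--
--     One pass over the source gathers every (day, hour) cell into a table,
--     then a cheap assembly walk emits the cells in day/hour order.
--     """
--     cells = {}
--     if histogram is not None:
--         for value in histogram.values():
--             for day, inner in value.items():
--                 if 0 <= day < 7:
--                     for hour, x in inner.items():
--                         if 0 <= hour < 24 and x is not None:
--                             cells.setdefault((day, hour), []).append(x)
--     transposed = {}
--     for day in range(7):
--         for hour in range(24):
--             if (day, hour) in cells:
--                 transposed.setdefault(day, {})[hour] = cells[(day, hour)]
--     return transposed
-- ===== Notes on version B (the rewrite author's own statement) =====
-- stated objective: faster
-- what changed: B replaces A's 7x24 rescans of the whole histogram (two dict lookups per PC per probe) with a single pass over the source that groups values into a (day,hour)->list table, then a fixed-size 7x24 assembly walk with O(1) table lookups; Pre_ only excludes association lists with duplicate day/hour keys, which do not represent any Python dict, so no Python input is excluded.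
import Mathlib
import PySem

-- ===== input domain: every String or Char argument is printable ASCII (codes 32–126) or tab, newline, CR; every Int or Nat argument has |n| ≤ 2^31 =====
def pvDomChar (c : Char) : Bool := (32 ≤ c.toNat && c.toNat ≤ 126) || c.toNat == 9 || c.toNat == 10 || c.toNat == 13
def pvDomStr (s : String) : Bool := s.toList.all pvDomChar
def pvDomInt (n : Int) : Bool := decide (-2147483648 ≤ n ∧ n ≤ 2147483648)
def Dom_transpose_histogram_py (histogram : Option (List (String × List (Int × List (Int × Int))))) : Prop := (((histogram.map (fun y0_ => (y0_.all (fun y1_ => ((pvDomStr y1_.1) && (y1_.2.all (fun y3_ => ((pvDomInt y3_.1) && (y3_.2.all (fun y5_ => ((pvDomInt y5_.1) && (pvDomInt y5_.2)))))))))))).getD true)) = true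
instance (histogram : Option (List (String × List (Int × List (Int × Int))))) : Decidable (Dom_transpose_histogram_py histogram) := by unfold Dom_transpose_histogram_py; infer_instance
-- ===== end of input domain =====

-- B replaces A's 7×24 rescans of every PC dict by one grouping pass over the source plus a
-- fixed-size assembly walk (objective: faster). Return-value equivalence; neither mutates its argument.

-- ===== PORT A =====
def transpose_histogram_py (histogram : Option (List (String × List (Int × List (Int × Int))))) : List (Int × List (Int × List Int)) :=
  let transposed : PySem.Dict Int (PySem.Dict Int (List Int)) :=
    match histogram with
    | none => PySem.Dict.mk []
    | some h =>
      (PySem.List.pyRange 0 7 1).foldl (fun t day =>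
        (PySem.List.pyRange 0 24 1).foldl (fun t hour =>
          (h.map Prod.snd).foldl (fun t value =>
            match (PySem.Dict.mk (((PySem.Dict.mk value).get? day).getD [])).get? hour with
            | none => t
            | some x =>
              t.modify day (PySem.Dict.mk []) (fun inner => inner.modify hour [] (fun l => l ++ [x]))) t) t)
        (PySem.Dict.mk [])
  transposed.items.map (fun p => (p.1, p.2.items))

-- ===== PORT B =====
def transpose_histogram_py_alt (histogram : Option (List (String × List (Int × List (Int × Int))))) : List (Int × List (Int × List Int)) :=
  let cells : PySem.Dict (Int × Int) (List Int) :=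
    match histogram with
    | none => PySem.Dict.mk []
    | some h =>
      (h.map Prod.snd).foldl (fun c value =>
        value.foldl (fun c dp =>
          if 0 ≤ dp.1 ∧ dp.1 < 7 then
            dp.2.foldl (fun c hp =>
              if 0 ≤ hp.1 ∧ hp.1 < 24 then c.modify (dp.1, hp.1) [] (fun l => l ++ [hp.2]) else c) c
          else c) c) (PySem.Dict.mk [])
  let transposed : PySem.Dict Int (PySem.Dict Int (List Int)) :=
    (PySem.List.pyRange 0 7 1).foldl (fun t day =>
      (PySem.List.pyRange 0 24 1).foldl (fun t hour =>
        if cells.contains (day, hour) then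
          t.modify day (PySem.Dict.mk []) (fun inner => inner.insert hour (cells.getD (day, hour) []))
        else t) t) (PySem.Dict.mk [])
  transposed.items.map (fun p => (p.1, p.2.items))

-- ===== PRECONDITION & SPEC =====
-- Pre_ excludes only association lists carrying a duplicate day key or a duplicate hour key:
-- such lists do not represent any Python dict (dict keys are unique), so no Python input A returns on is excluded.
def Pre_transpose_histogram_py (histogram : Option (List (String × List (Int × List (Int × Int))))) : Prop :=
  ∀ pc ∈ histogram.getD [], (pc.2.map Prod.fst).Nodup ∧ ∀ dp ∈ pc.2, (dp.2.map Prod.fst).Nodup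
instance (histogram : Option (List (String × List (Int × List (Int × Int))))) : Decidable (Pre_transpose_histogram_py histogram) := by unfold Pre_transpose_histogram_py; infer_instance

def pvWitness_transpose_histogram_py : (Option (List (String × List (Int × List (Int × Int))))) :=
  some [("pc1", [(0, [(0, 5), (3, 7)]), (2, [(1, 4)])]), ("pc2", [(0, [(0, 9)])])]

def Spec_transpose_histogram_py (histogram : Option (List (String × List (Int × List (Int × Int))))) (out : List (Int × List (Int × List Int))) : Prop := out = transpose_histogram_py_alt histogram
instance (histogram : Option (List (String × List (Int × List (Int × Int))))) (out : List (Int × List (Int × List Int))) : Decidable (Spec_transpose_histogram_py histogram out) := by unfold Spec_transpose_histogram_py; infer_instance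

-- ===== CLAIM (what is proved, stated in full; the proofs are below) =====
def Claim_equal_transpose_histogram_py : Prop := ∀ (histogram : Option (List (String × List (Int × List (Int × Int))))), Dom_transpose_histogram_py histogram → Pre_transpose_histogram_py histogram → Spec_transpose_histogram_py histogram (transpose_histogram_py histogram)

-- ===== LEMMAS AND PROOFS =====

-- the list of values Python collects for cell (d, hr): one per PC whose dict has day d and hour hr
def pvCell (h : List (String × List (Int × List (Int × Int)))) (d hr : Int) : List Int :=
  h.filterMap (fun pc => (PySem.Dict.mk (((PySem.Dict.mk pc.2).get? d).getD [])).get? hr)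

def pvDays : List Int := [0, 1, 2, 3, 4, 5, 6]
def pvHours : List Int := [0, 1, 2, 3, 4, 5, 6, 7, 8, 9, 10, 11, 12, 13, 14, 15, 16, 17, 18, 19, 20, 21, 22, 23]

-- the common normal form both ports are reduced to
def pvCanon (h : List (String × List (Int × List (Int × Int)))) : List (Int × List (Int × List Int)) :=
  (pvDays.filter (fun d => pvHours.any (fun hr => !(pvCell h d hr == [])))).map
    (fun d => (d, (pvHours.filter (fun hr => !(pvCell h d hr == []))).map (fun hr => (hr, pvCell h d hr))))

-- B's grouping table and the flattened source stream, named for the proofs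
def pvCells (h : List (String × List (Int × List (Int × Int)))) : PySem.Dict (Int × Int) (List Int) :=
  (h.map Prod.snd).foldl (fun c value =>
    value.foldl (fun c dp =>
      if 0 ≤ dp.1 ∧ dp.1 < 7 then
        dp.2.foldl (fun c hp =>
          if 0 ≤ hp.1 ∧ hp.1 < 24 then c.modify (dp.1, hp.1) [] (fun l => l ++ [hp.2]) else c) c
      else c) c) (PySem.Dict.mk [])

def pvQ (h : List (String × List (Int × List (Int × Int)))) : List ((Int × Int) × Int) :=
  (h.map Prod.snd).flatMap (fun value =>
    (value.filter (fun dp => decide (0 ≤ dp.1 ∧ dp.1 < 7))).flatMap (fun dp =>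
      (dp.2.filter (fun hp => decide (0 ≤ hp.1 ∧ hp.1 < 24))).map (fun hp => ((dp.1, hp.1), hp.2))))

theorem pv_mem_days {d : Int} (hm : d ∈ pvDays) : 0 ≤ d ∧ d < 7 := by
  fin_cases hm <;> norm_num

theorem pv_mem_hours {hr : Int} (hm : hr ∈ pvHours) : 0 ≤ hr ∧ hr < 24 := by
  fin_cases hm <;> norm_num

theorem pv_modify_modify {κ ν : Type} [BEq κ] [LawfulBEq κ] (t : PySem.Dict κ ν) (k : κ) (d0 : ν)
    (f g : ν → ν) : (t.modify k d0 f).modify k d0 g = t.modify k d0 (fun v => g (f v)) := by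
  simp [PySem.Dict.modify, PySem.Dict.getD_eq_get?_getD, PySem.Dict.get?_insert_self,
    PySem.Dict.insert_insert_self]

theorem pv_insert_eq_modify {κ : Type} [BEq κ] [LawfulBEq κ] (t : PySem.Dict κ (List Int)) (k : κ)
    (v : List Int) : t.insert k v = t.modify k [] (fun _ => v) := rfl

theorem pv_foldl_if_id {ν ι : Type} (p : ι → Bool) (f : ι → ν → ν) :
    ∀ (ks : List ι), ks.any p = false →
      ∀ (v : ν), ks.foldl (fun v i => if p i then f i v else v) v = v := by
  intro ks
  induction ks with
  | nil => intro _ v; rfl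
  | cons i ks ih =>
    intro ha v
    simp only [List.any_cons, Bool.or_eq_false_iff] at ha
    rw [List.foldl_cons, if_neg (by simp [ha.1])]
    exact ih ha.2 v

-- a fold that conditionally modifies a fixed key = one modify with the folded inner function
theorem pv_foldl_if_modify {κ ν ι : Type} [BEq κ] [LawfulBEq κ] (k : κ) (d0 : ν) (p : ι → Bool)
    (f : ι → ν → ν) : ∀ (ks : List ι) (t : PySem.Dict κ ν),
    ks.foldl (fun t i => if p i then t.modify k d0 (f i) else t) t
      = if ks.any p then t.modify k d0 (fun v => ks.foldl (fun v i => if p i then f i v else v) v)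
        else t := by
  intro ks
  induction ks with
  | nil => intro t; simp
  | cons i ks ih =>
    intro t
    rw [List.foldl_cons]
    by_cases hp : p i = true
    · rw [if_pos hp, ih, if_pos (by simp [hp] : (i :: ks).any p = true)]
      by_cases ha : ks.any p = true
      · rw [if_pos ha, pv_modify_modify]
        congr 1
        funext v
        rw [List.foldl_cons, if_pos hp]
      · rw [if_neg ha]
        congr 1
        funext v
        rw [List.foldl_cons, if_pos hp]
        exact (pv_foldl_if_id p f ks (by simpa using ha) (f i v)).symm
    · rw [if_neg hp, ih]
      have hany : (i :: ks).any p = ks.any p := by simp [hp]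
      rw [hany]
      by_cases ha : ks.any p = true
      · rw [if_pos ha, if_pos ha]
        congr 1
        funext v
        rw [List.foldl_cons, if_neg hp]
      · rw [if_neg ha, if_neg ha]

-- a conditional-modify fold over distinct fresh keys appends one item per accepted key
theorem pv_foldl_fresh_modify {κ ν ι : Type} [BEq κ] [LawfulBEq κ] (d0 : ν) (key : ι → κ)
    (p : ι → Bool) (f : ι → ν → ν) : ∀ (ks : List ι) (t : PySem.Dict κ ν),
    (ks.map key).Nodup → (∀ i ∈ ks, t.contains (key i) = false) →
    ks.foldl (fun t i => if p i then t.modify (key i) d0 (f i) else t) t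
      = PySem.Dict.mk (t.items ++ (ks.filter p).map (fun i => (key i, f i d0))) := by
  intro ks
  induction ks with
  | nil =>
    intro t _ _
    simp
  | cons i ks ih =>
    intro t hnd hfresh
    simp only [List.map_cons, List.nodup_cons] at hnd
    have hci : t.contains (key i) = false := hfresh i (List.mem_cons_self)
    rw [List.foldl_cons]
    by_cases hp : p i = true
    · rw [if_pos hp]
      have hmod : t.modify (key i) d0 (f i) = PySem.Dict.mk (t.items ++ [(key i, f i d0)]) := by
        have hg : t.getD (key i) d0 = d0 := PySem.Dict.getD_of_not_contains t d0 hci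
        have hins := PySem.Dict.items_insert_of_not_contains t (f i (t.getD (key i) d0)) hci
        apply PySem.Dict.ext
        rw [PySem.Dict.modify, hins, hg]
      have hfresh' : ∀ j ∈ ks,
          (PySem.Dict.mk (t.items ++ [(key i, f i d0)])).contains (key j) = false := by
        intro j hj
        have hne : (key i == key j) = false := by
          refine beq_eq_false_iff_ne.mpr ?_
          intro he
          exact hnd.1 (by rw [he]; exact List.mem_map_of_mem hj)
        have hcj := hfresh j (List.mem_cons_of_mem i hj)
        simp only [PySem.Dict.contains] at hcj ⊢
        simp [List.any_append, hcj, hne]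
      rw [hmod, ih (PySem.Dict.mk (t.items ++ [(key i, f i d0)])) hnd.2 hfresh']
      rw [List.filter_cons_of_pos hp, List.map_cons]
      simp [List.append_assoc]
    · rw [if_neg hp, ih t hnd.2 (fun j hj => hfresh j (List.mem_cons_of_mem i hj)),
        List.filter_cons_of_neg (by simp [hp])]

-- A's innermost loop over all PC dicts, for one fixed (day, hour)
theorem pv_valfold (h : List (String × List (Int × List (Int × Int)))) (d hr : Int) :
    ∀ (t : PySem.Dict Int (PySem.Dict Int (List Int))),
    (h.map Prod.snd).foldl (fun t value =>
        match (PySem.Dict.mk (((PySem.Dict.mk value).get? d).getD [])).get? hr with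
        | none => t
        | some x =>
          t.modify d (PySem.Dict.mk []) (fun inner => inner.modify hr [] (fun l => l ++ [x]))) t
      = if !(pvCell h d hr == []) then
          t.modify d (PySem.Dict.mk []) (fun inner => inner.modify hr [] (fun l => l ++ pvCell h d hr))
        else t := by
  induction h with
  | nil => intro t; rfl
  | cons pc rest ih =>
    intro t
    rw [List.map_cons, List.foldl_cons]
    cases hc : (PySem.Dict.mk (((PySem.Dict.mk pc.2).get? d).getD [])).get? hr with
    | none =>
      have hcell : pvCell (pc :: rest) d hr = pvCell rest d hr := by simp [pvCell, hc]
      simp only []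
      rw [ih t, hcell]
    | some x =>
      have hcell : pvCell (pc :: rest) d hr = x :: pvCell rest d hr := by simp [pvCell, hc]
      simp only []
      rw [ih (t.modify d (PySem.Dict.mk []) (fun inner => inner.modify hr [] (fun l => l ++ [x]))),
        hcell]
      rw [if_pos (show (!((x :: pvCell rest d hr : List Int) == [])) = true by simp)]
      by_cases hL : pvCell rest d hr = []
      · rw [hL]
        simp
      · have hBL : ((pvCell rest d hr : List Int) == []) = false := beq_eq_false_iff_ne.mpr hL
        rw [if_pos (show (!((pvCell rest d hr : List Int) == [])) = true by simp [hBL]),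
          pv_modify_modify]
        congr 1
        funext inner
        rw [pv_modify_modify]
        congr 1
        funext l
        simp

theorem pv_A_eq_canon (h : List (String × List (Int × List (Int × Int)))) :
    transpose_histogram_py (some h) = pvCanon h := by
  show (pvDays.foldl (fun t day =>
      pvHours.foldl (fun t hour =>
        (h.map Prod.snd).foldl (fun t value =>
          match (PySem.Dict.mk (((PySem.Dict.mk value).get? day).getD [])).get? hour with
          | none => t
          | some x =>
            t.modify day (PySem.Dict.mk []) (fun inner => inner.modify hour [] (fun l => l ++ [x]))) t) t)
      (PySem.Dict.mk [])).items.map (fun p => (p.1, p.2.items)) = pvCanon h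
  simp only [pv_valfold]
  simp only [pv_foldl_if_modify]
  rw [pv_foldl_fresh_modify (PySem.Dict.mk []) (fun (dd : Int) => dd) _ _ pvDays (PySem.Dict.mk [])
    (by decide) (fun _ _ => rfl)]
  simp only [List.nil_append, List.map_map]
  rw [pvCanon]
  refine List.map_congr_left ?_
  intro d _
  simp only [Function.comp_apply]
  refine congrArg (Prod.mk d) ?_
  rw [pv_foldl_fresh_modify [] (fun (hh : Int) => hh) _ _ pvHours (PySem.Dict.mk [])
    (by decide) (fun _ _ => rfl)]
  simp [List.nil_append]

theorem pv_block_ne (a d hr : Int) (hne : a ≠ d) (inner : List (Int × Int)) :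
    (((inner.filter (fun hp => decide (0 ≤ hp.1 ∧ hp.1 < 24))).map (fun hp => ((a, hp.1), hp.2))).filter
        (fun q => q.1 == (d, hr))).map (fun q => q.2) = [] := by
  rw [List.filter_map]
  have hnil : (inner.filter (fun hp => decide (0 ≤ hp.1 ∧ hp.1 < 24))).filter
      ((fun q => q.1 == (d, hr)) ∘ fun hp => ((a, hp.1), hp.2)) = [] := by
    refine List.filter_eq_nil_iff.mpr ?_
    intro hp _
    simp [Function.comp, hne]
  rw [hnil]
  simp

theorem pv_hrs_nil (d hr : Int) (inner : List (Int × Int)) (hmem : hr ∉ inner.map Prod.fst) :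
    (((inner.filter (fun hp => decide (0 ≤ hp.1 ∧ hp.1 < 24))).map (fun hp => ((d, hp.1), hp.2))).filter
        (fun q => q.1 == (d, hr))).map (fun q => q.2) = [] := by
  rw [List.filter_map]
  have hnil : (inner.filter (fun hp => decide (0 ≤ hp.1 ∧ hp.1 < 24))).filter
      ((fun q => q.1 == (d, hr)) ∘ fun hp => ((d, hp.1), hp.2)) = [] := by
    refine List.filter_eq_nil_iff.mpr ?_
    intro hp hhp
    have hne : hp.1 ≠ hr := by
      intro he
      exact hmem (he ▸ List.mem_map_of_mem (List.mem_of_mem_filter hhp))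
    simp [Function.comp, hne]
  rw [hnil]
  simp

theorem pv_block_eq (d hr : Int) (hhr : 0 ≤ hr ∧ hr < 24) :
    ∀ (inner : List (Int × Int)), (inner.map Prod.fst).Nodup →
    (((inner.filter (fun hp => decide (0 ≤ hp.1 ∧ hp.1 < 24))).map (fun hp => ((d, hp.1), hp.2))).filter
        (fun q => q.1 == (d, hr))).map (fun q => q.2)
      = ((PySem.Dict.mk inner).get? hr).toList := by
  intro inner
  induction inner with
  | nil => intro _; rfl
  | cons hp rest ih =>
    intro hnd
    obtain ⟨hk, hv⟩ := hp
    simp only [List.map_cons, List.nodup_cons] at hnd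
    by_cases heq : hk = hr
    · subst heq
      rw [List.filter_cons_of_pos (by simp [hhr.1, hhr.2]), List.map_cons,
        List.filter_cons_of_pos (by simp), List.map_cons,
        PySem.Dict.get?_mk_cons hk hv rest hk, if_pos (by simp)]
      rw [pv_hrs_nil d hk rest hnd.1]
      simp
    · rw [PySem.Dict.get?_mk_cons hk hv rest hr, if_neg (by simp [heq])]
      by_cases h24 : (0 ≤ hk ∧ hk < 24)
      · rw [List.filter_cons_of_pos (by simp [h24.1, h24.2]), List.map_cons,
          List.filter_cons_of_neg (by simp [heq])]
        exact ih hnd.2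
      · rw [List.filter_cons_of_neg (by simp [h24])]
        exact ih hnd.2

theorem pv_value_nil (d hr : Int) :
    ∀ (value : List (Int × List (Int × Int))), d ∉ value.map Prod.fst →
    (value.filter (fun dp => decide (0 ≤ dp.1 ∧ dp.1 < 7))).flatMap
        (fun dp => (((dp.2.filter (fun hp => decide (0 ≤ hp.1 ∧ hp.1 < 24))).map
            (fun hp => ((dp.1, hp.1), hp.2))).filter (fun q => q.1 == (d, hr))).map (fun q => q.2))
      = [] := by
  intro value
  induction value with
  | nil => intro _; rfl
  | cons dp rest ih =>
    intro hmem
    simp only [List.map_cons, List.mem_cons, not_or] at hmem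
    have hne : dp.1 ≠ d := fun he => hmem.1 he.symm
    by_cases h7 : (0 ≤ dp.1 ∧ dp.1 < 7)
    · rw [List.filter_cons_of_pos (by simp [h7.1, h7.2]), List.flatMap_cons,
        pv_block_ne dp.1 d hr hne dp.2, List.nil_append]
      exact ih hmem.2
    · rw [List.filter_cons_of_neg (by simp [h7])]
      exact ih hmem.2

theorem pv_value (d hr : Int) (hd : 0 ≤ d ∧ d < 7) (hhr : 0 ≤ hr ∧ hr < 24) :
    ∀ (value : List (Int × List (Int × Int))), (value.map Prod.fst).Nodup →
    (∀ dp ∈ value, (dp.2.map Prod.fst).Nodup) →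
    (value.filter (fun dp => decide (0 ≤ dp.1 ∧ dp.1 < 7))).flatMap
        (fun dp => (((dp.2.filter (fun hp => decide (0 ≤ hp.1 ∧ hp.1 < 24))).map
            (fun hp => ((dp.1, hp.1), hp.2))).filter (fun q => q.1 == (d, hr))).map (fun q => q.2))
      = ((PySem.Dict.mk (((PySem.Dict.mk value).get? d).getD [])).get? hr).toList := by
  intro value
  induction value with
  | nil => intro _ _; rfl
  | cons dp rest ih =>
    intro hnd hinner
    obtain ⟨dk, dv⟩ := dp
    simp only [List.map_cons, List.nodup_cons] at hnd
    by_cases hdd : dk = d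
    · subst hdd
      rw [List.filter_cons_of_pos (by simp [hd.1, hd.2]), List.flatMap_cons,
        PySem.Dict.get?_mk_cons dk dv rest dk, if_pos (by simp)]
      rw [pv_value_nil dk hr rest hnd.1, List.append_nil]
      exact pv_block_eq dk hr hhr dv (hinner (dk, dv) List.mem_cons_self)
    · rw [PySem.Dict.get?_mk_cons dk dv rest d, if_neg (by simp [hdd])]
      have ihres := ih hnd.2 (fun q hq => hinner q (List.mem_cons_of_mem _ hq))
      by_cases h7 : (0 ≤ dk ∧ dk < 7)
      · rw [List.filter_cons_of_pos (by simp [h7.1, h7.2]), List.flatMap_cons,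
          pv_block_ne dk d hr hdd dv, List.nil_append]
        exact ihres
      · rw [List.filter_cons_of_neg (by simp [h7])]
        exact ihres

theorem pv_filterQ (d hr : Int) (hd : 0 ≤ d ∧ d < 7) (hhr : 0 ≤ hr ∧ hr < 24) :
    ∀ (h : List (String × List (Int × List (Int × Int)))),
    (∀ pc ∈ h, (pc.2.map Prod.fst).Nodup ∧ ∀ dp ∈ pc.2, (dp.2.map Prod.fst).Nodup) →
    ((pvQ h).filter (fun q => q.1 == (d, hr))).map (fun q => q.2) = pvCell h d hr := by
  intro h
  induction h with
  | nil => intro _; rfl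
  | cons pc rest ih =>
    intro hpre
    have hpc := hpre pc List.mem_cons_self
    have hrest := ih (fun q hq => hpre q (List.mem_cons_of_mem _ hq))
    have hsplit : pvQ (pc :: rest)
        = ((pc.2.filter (fun dp => decide (0 ≤ dp.1 ∧ dp.1 < 7))).flatMap (fun dp =>
            (dp.2.filter (fun hp => decide (0 ≤ hp.1 ∧ hp.1 < 24))).map (fun hp => ((dp.1, hp.1), hp.2))))
          ++ pvQ rest := by
      simp [pvQ]
    rw [hsplit, List.filter_append, List.map_append, hrest]
    rw [List.filter_flatMap, List.map_flatMap]
    rw [pv_value d hr hd hhr pc.2 hpc.1 hpc.2]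
    cases hc : (PySem.Dict.mk (((PySem.Dict.mk pc.2).get? d).getD [])).get? hr <;> simp [pvCell, hc]

theorem pv_cells_eq_flat (h : List (String × List (Int × List (Int × Int)))) :
    pvCells h = (pvQ h).foldl (fun c q => c.modify q.1 [] (fun l => l ++ [q.2])) (PySem.Dict.mk []) := by
  simp only [pvCells, pvQ, List.foldl_flatMap, List.foldl_map, List.foldl_filter, decide_eq_true_eq]

theorem pv_cells_getD (h : List (String × List (Int × List (Int × Int))))
    (hpre : ∀ pc ∈ h, (pc.2.map Prod.fst).Nodup ∧ ∀ dp ∈ pc.2, (dp.2.map Prod.fst).Nodup)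
    (d hr : Int) (hd : 0 ≤ d ∧ d < 7) (hhr : 0 ≤ hr ∧ hr < 24) :
    (pvCells h).getD (d, hr) [] = pvCell h d hr := by
  rw [pv_cells_eq_flat, PySem.Dict.getD_foldl_modify_append, pv_filterQ d hr hd hhr h hpre]
  rfl

theorem pv_cells_contains (h : List (String × List (Int × List (Int × Int))))
    (hpre : ∀ pc ∈ h, (pc.2.map Prod.fst).Nodup ∧ ∀ dp ∈ pc.2, (dp.2.map Prod.fst).Nodup)
    (d hr : Int) (hd : 0 ≤ d ∧ d < 7) (hhr : 0 ≤ hr ∧ hr < 24) :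
    (pvCells h).contains (d, hr) = !(pvCell h d hr == []) := by
  have hkeys : (pvCells h).keys = PySem.Set.ofList ((pvQ h).map (fun q => q.1)) := by
    rw [pv_cells_eq_flat,
      PySem.Dict.keys_foldl_modify_key (pvQ h) (fun q : (Int × Int) × Int => q.1) []
        (fun _ q => fun l => l ++ [q.2]) (PySem.Dict.mk [])]
    rw [show (PySem.Dict.mk [] : PySem.Dict (Int × Int) (List Int)).keys = [] from rfl,
      PySem.Set.update_nil_left]
  rw [PySem.Dict.contains_eq_decide_mem_keys, hkeys]
  have hcell := pv_filterQ d hr hd hhr h hpre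
  by_cases hin : (d, hr) ∈ (pvQ h).map (fun q => q.1)
  · rw [decide_eq_true ((PySem.Set.mem_ofList _ _).mpr hin)]
    obtain ⟨q, hq, hq1⟩ := List.mem_map.mp hin
    have hmem : q.2 ∈ pvCell h d hr := by
      rw [← hcell]
      exact List.mem_map_of_mem (List.mem_filter.mpr ⟨hq, by simp [hq1]⟩)
    have hne : pvCell h d hr ≠ [] := fun he => by simp [he] at hmem
    simp [hne]
  · rw [decide_eq_false (fun hmem => hin ((PySem.Set.mem_ofList _ _).mp hmem))]
    have hflt : (pvQ h).filter (fun q => q.1 == (d, hr)) = [] := by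
      refine List.filter_eq_nil_iff.mpr ?_
      intro q hq hqeq
      exact hin (List.mem_map.mpr ⟨q, hq, by simpa using hqeq⟩)
    have hnil : pvCell h d hr = [] := by rw [← hcell, hflt]; rfl
    simp [hnil]

theorem pv_any_congr {α : Type} (p q : α → Bool) :
    ∀ (l : List α), (∀ a ∈ l, p a = q a) → l.any p = l.any q := by
  intro l
  induction l with
  | nil => intro _; rfl
  | cons a l ih =>
    intro hc
    rw [List.any_cons, List.any_cons, hc a List.mem_cons_self,
      ih (fun b hb => hc b (List.mem_cons_of_mem _ hb))]

theorem pv_B_eq_canon (h : List (String × List (Int × List (Int × Int))))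
    (hpre : ∀ pc ∈ h, (pc.2.map Prod.fst).Nodup ∧ ∀ dp ∈ pc.2, (dp.2.map Prod.fst).Nodup) :
    transpose_histogram_py_alt (some h) = pvCanon h := by
  show (pvDays.foldl (fun t day =>
      pvHours.foldl (fun t hour =>
        if (pvCells h).contains (day, hour) then
          t.modify day (PySem.Dict.mk [])
            (fun inner => inner.insert hour ((pvCells h).getD (day, hour) []))
        else t) t) (PySem.Dict.mk [])).items.map (fun p => (p.1, p.2.items)) = pvCanon h
  simp only [pv_foldl_if_modify]
  rw [pv_foldl_fresh_modify (PySem.Dict.mk []) (fun (dd : Int) => dd) _ _ pvDays (PySem.Dict.mk [])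
    (by decide) (fun _ _ => rfl)]
  simp only [List.nil_append, List.map_map]
  rw [pvCanon]
  rw [List.filter_congr (fun d hd => pv_any_congr
    (fun hr => (pvCells h).contains (d, hr)) (fun hr => !(pvCell h d hr == [])) pvHours
    (fun hr hhr => pv_cells_contains h hpre d hr (pv_mem_days hd) (pv_mem_hours hhr)))]
  refine List.map_congr_left ?_
  intro d hdmem
  have hd : 0 ≤ d ∧ d < 7 := pv_mem_days (List.mem_filter.mp hdmem).1
  simp only [Function.comp_apply]
  refine congrArg (Prod.mk d) ?_
  simp only [pv_insert_eq_modify]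
  rw [pv_foldl_fresh_modify [] (fun (hh : Int) => hh) _ _ pvHours (PySem.Dict.mk [])
    (by decide) (fun _ _ => rfl)]
  dsimp only
  rw [List.filter_congr (fun hr hhr => pv_cells_contains h hpre d hr hd (pv_mem_hours hhr))]
  refine List.map_congr_left ?_
  intro hr hhrmem
  have hhr : 0 ≤ hr ∧ hr < 24 := pv_mem_hours (List.mem_filter.mp hhrmem).1
  rw [pv_cells_getD h hpre d hr hd hhr]

-- ===== VERDICT (by name: the statement is the Claim_ definition above) =====
theorem transpose_histogram_py_spec : Claim_equal_transpose_histogram_py := by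
  intro histogram _ hpre
  unfold Spec_transpose_histogram_py
  cases histogram with
  | none => rfl
  | some h =>
    rw [pv_A_eq_canon, pv_B_eq_canon]
    intro pc hpc
    exact hpre pc (by simpa using hpc)
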